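-- pv_equiv track=rewrite | github.com/RfidResearchGroup/proxmark3 | client/pyscripts/ntag22x_libsuncmac.py | sliced_enumerate_words_with_k_bits_set
-- ===== SOURCE A (Python) =====
-- from itertools import combinations
--
-- def sliced_enumerate_words_with_k_bits_set(n_bits, max_bits_set, slice_index=0, total_slices=1, mask=0):
--     """Generate slice idx over tot slices of all n-bit words with up to max_bits_set bits set, respecting a mask."""
--     non_masked_positions = [pos for pos in range(n_bits) if not (mask & (1 << pos))]
--     n = 0
--     if n % total_slices == slice_index:
--         yield 0
--     for k in range(1, max_bits_set + 1):
--         for bits in combinations(non_masked_positions, k):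
--             n += 1
--             value = 0
--             for pos in bits:
--                 value |= (1 << pos)
--             if n % total_slices == slice_index:
--                 yield value
-- ===== SOURCE B (Python) =====
-- def sliced_enumerate_words_with_k_bits_set(n_bits, max_bits_set, slice_index=0, total_slices=1, mask=0):
--     """Generate slice idx over tot slices of all n-bit words with up to max_bits_set bits set, respecting a mask."""
--     kmax = max(max_bits_set, 0)
--     # Pascal-style DP over positions, processed right-to-left: rows[k] = all words
--     # with exactly k bits chosen from the suffix processed so far, in the required order.
--     rows = [[0]] + [[] for _ in range(kmax)]
--     for p in reversed([q for q in range(n_bits) if not (mask & (1 << q))]):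
--         bit = 1 << p
--         rows = [rows[0]] + [[bit | w for w in rows[k - 1]] + rows[k] for k in range(1, kmax + 1)]
--     for idx, value in enumerate(w for row in rows for w in row):
--         if idx % total_slices == slice_index:
--             yield value
-- ===== Notes on version B (the rewrite author's own statement) =====
-- stated objective: alternative
-- what changed: B replaces A's per-combination enumeration (itertools.combinations with an OR loop and a hand-maintained counter) by a Pascal-style dynamic-programming table built right-to-left over positions (rows[k] = words with exactly k bits of the processed suffix), which is then flattened and sliced by enumerate index modulo total_slices.
import Mathlib
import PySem

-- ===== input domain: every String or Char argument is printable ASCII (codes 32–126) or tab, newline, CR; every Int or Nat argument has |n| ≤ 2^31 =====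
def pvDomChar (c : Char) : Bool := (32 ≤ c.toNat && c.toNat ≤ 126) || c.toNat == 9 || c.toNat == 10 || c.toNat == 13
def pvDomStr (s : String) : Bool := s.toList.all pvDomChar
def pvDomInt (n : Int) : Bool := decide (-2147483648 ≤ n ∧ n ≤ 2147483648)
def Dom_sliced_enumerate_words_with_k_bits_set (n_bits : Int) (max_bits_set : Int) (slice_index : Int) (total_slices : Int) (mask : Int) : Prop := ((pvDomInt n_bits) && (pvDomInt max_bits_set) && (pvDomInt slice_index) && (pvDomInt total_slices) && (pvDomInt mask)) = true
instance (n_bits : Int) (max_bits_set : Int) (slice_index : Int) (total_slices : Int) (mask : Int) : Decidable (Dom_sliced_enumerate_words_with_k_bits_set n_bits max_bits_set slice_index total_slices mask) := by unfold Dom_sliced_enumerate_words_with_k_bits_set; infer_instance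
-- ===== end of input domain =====

-- B replaces A's per-combination enumeration by a Pascal-style dynamic-programming table (rows[k] = words
-- with exactly k bits, built right-to-left over positions), then flattens and slices by enumerate index
-- (objective: alternative algorithm, same asymptotic cost).


-- ===== PORT A =====
def sliced_enumerate_words_with_k_bits_set (n_bits : Int) (max_bits_set : Int) (slice_index : Int) (total_slices : Int) (mask : Int) : List Int :=
  -- non_masked_positions = [pos for pos in range(n_bits) if not (mask & (1 << pos))]
  let non_masked_positions : List Int :=
    (PySem.List.pyRange 0 n_bits 1).filter (fun pos => PySem.Int.band mask ((1 : Int) <<< pos.toNat) == 0)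
  -- n = 0; if n % total_slices == slice_index: yield 0
  let init : Int × List Int :=
    (0, if PySem.Int.mod 0 total_slices == slice_index then [(0 : Int)] else [])
  -- for k … for bits … : n += 1; value = fold of |=; conditionally yield value
  let fin : Int × List Int :=
    (PySem.List.pyRange 1 (max_bits_set + 1) 1).foldl (fun st k =>
      (PySem.List.combinations non_masked_positions k.toNat).foldl (fun st bits =>
        let n := st.1 + 1
        let value := bits.foldl (fun v pos => PySem.Int.bor v ((1 : Int) <<< pos.toNat)) 0
        (n, if PySem.Int.mod n total_slices == slice_index then st.2 ++ [value] else st.2)) st) init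
  fin.2

-- ===== PORT B =====
def sliced_enumerate_words_with_k_bits_set_alt (n_bits : Int) (max_bits_set : Int) (slice_index : Int) (total_slices : Int) (mask : Int) : List Int :=
  -- kmax = max(max_bits_set, 0)
  let kmax : Nat := (max max_bits_set 0).toNat
  -- rows = [[0]] + [[] for _ in range(kmax)]
  let rows0 : List (List Int) := [[(0 : Int)]] ++ List.replicate kmax []
  -- for p in reversed([q for q in range(n_bits) if not (mask & (1 << q))]): …
  let positions : List Int :=
    (PySem.List.pyRange 0 n_bits 1).filter (fun q => PySem.Int.band mask ((1 : Int) <<< q.toNat) == 0)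
  let rows : List (List Int) :=
    positions.reverse.foldl (fun rows p =>
      let bit : Int := (1 : Int) <<< (p.toNat : Int)
      -- rows = [rows[0]] + [[bit | w for w in rows[k-1]] + rows[k] for k in range(1, kmax+1)]  (i = k-1)
      [rows.getD 0 []] ++ (List.range kmax).map (fun i =>
        ((rows.getD i []).map (fun w => PySem.Int.bor bit w)) ++ rows.getD (i + 1) [])) rows0
  -- for idx, value in enumerate(w for row in rows for w in row): if idx % total_slices == slice_index: yield value
  let stream : List Int := rows.flatMap id
  (PySem.List.enumerate stream 0).foldl (fun acc iv =>
    if PySem.Int.mod iv.1 total_slices == slice_index then acc ++ [iv.2] else acc) []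

-- ===== PRECONDITION & SPEC =====
-- Pre_ excludes only total_slices = 0, where both generators raise ZeroDivisionError on '% total_slices'.
def Pre_sliced_enumerate_words_with_k_bits_set (n_bits : Int) (max_bits_set : Int) (slice_index : Int) (total_slices : Int) (mask : Int) : Prop := total_slices ≠ 0
instance (n_bits : Int) (max_bits_set : Int) (slice_index : Int) (total_slices : Int) (mask : Int) : Decidable (Pre_sliced_enumerate_words_with_k_bits_set n_bits max_bits_set slice_index total_slices mask) := by unfold Pre_sliced_enumerate_words_with_k_bits_set; infer_instance

def pvWitness_sliced_enumerate_words_with_k_bits_set : Int × Int × Int × Int × Int := (4, 2, 1, 2, 2)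

def Spec_sliced_enumerate_words_with_k_bits_set (n_bits : Int) (max_bits_set : Int) (slice_index : Int) (total_slices : Int) (mask : Int) (out : List Int) : Prop := out = sliced_enumerate_words_with_k_bits_set_alt n_bits max_bits_set slice_index total_slices mask
instance (n_bits : Int) (max_bits_set : Int) (slice_index : Int) (total_slices : Int) (mask : Int) (out : List Int) : Decidable (Spec_sliced_enumerate_words_with_k_bits_set n_bits max_bits_set slice_index total_slices mask out) := by unfold Spec_sliced_enumerate_words_with_k_bits_set; infer_instance

-- ===== CLAIM (what is proved, stated in full; the proofs are below) =====
def Claim_equal_sliced_enumerate_words_with_k_bits_set : Prop := ∀ (n_bits : Int) (max_bits_set : Int) (slice_index : Int) (total_slices : Int) (mask : Int), Dom_sliced_enumerate_words_with_k_bits_set n_bits max_bits_set slice_index total_slices mask → Pre_sliced_enumerate_words_with_k_bits_set n_bits max_bits_set slice_index total_slices mask → Spec_sliced_enumerate_words_with_k_bits_set n_bits max_bits_set slice_index total_slices mask (sliced_enumerate_words_with_k_bits_set n_bits max_bits_set slice_index total_slices mask)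

-- ===== LEMMAS AND PROOFS =====

theorem pvLorTwoPow : ∀ (n : Nat) (a : Nat), a < 2^n → a ||| 2^n = a + 2^n := by
  intro n
  induction n with
  | zero => intro a ha; interval_cases a; decide
  | succ n ih =>
    intro a ha
    have ha2 : a / 2 < 2^n := by have := Nat.pow_succ 2 n; omega
    have hbit : a = 2 * (a / 2) + (decide (a % 2 = 1)).toNat := by
      rcases Nat.mod_two_eq_zero_or_one a with h | h <;> simp [h] <;> omega
    have h1 : (2 * (a / 2) + (decide (a % 2 = 1)).toNat) ||| (2 * 2^n + (false : Bool).toNat)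
        = 2 * ((a / 2) ||| 2^n) + ((decide (a % 2 = 1)) || false).toNat := by
      have := Nat.lor_bit (decide (a % 2 = 1)) (a / 2) false (2^n)
      simpa [Nat.bit_val, Nat.mul_comm] using this
    rw [hbit]
    calc (2 * (a / 2) + (decide (a % 2 = 1)).toNat) ||| 2^(n+1)
        = (2 * (a / 2) + (decide (a % 2 = 1)).toNat) ||| (2 * 2^n + (false : Bool).toNat) := by
          norm_num [Nat.pow_succ, Nat.mul_comm]
      _ = 2 * ((a / 2) ||| 2^n) + ((decide (a % 2 = 1)) || false).toNat := h1
      _ = 2 * ((a / 2) + 2^n) + ((decide (a % 2 = 1))).toNat := by simp [ih _ ha2]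
      _ = (2 * (a / 2) + (decide (a % 2 = 1)).toNat) + 2^(n+1) := by rw [Nat.pow_succ]; ring

-- The mirror lemma: OR-ing a power below all set bits of a is addition.
theorem pvLorTwoPowHigh : ∀ (n : Nat) (a : Nat), 2^(n+1) ∣ a → 2^n ||| a = 2^n + a := by
  intro n
  induction n with
  | zero =>
    intro a ha
    obtain ⟨m, rfl⟩ := ha
    have h1 : (2 * 0 + (true : Bool).toNat) ||| (2 * m + (false : Bool).toNat)
        = 2 * (0 ||| m) + ((true : Bool) || false).toNat := by
      have := Nat.lor_bit true 0 false m
      simpa [Nat.bit_val, Nat.mul_comm] using this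
    simpa [Nat.mul_comm, Nat.add_comm] using h1
  | succ n ih =>
    intro a ha
    have h2 : 2 ∣ a := dvd_trans (by exact Dvd.intro_left (2^(n+1)) rfl) ha
    obtain ⟨m, rfl⟩ := h2
    have hm : 2^(n+1) ∣ m := by
      have : 2^(n+2) = 2 * 2^(n+1) := by ring
      rw [this] at ha
      exact (mul_dvd_mul_iff_left (by norm_num : (2:Nat) ≠ 0)).mp ha
    have h1 : (2 * 2^n + (false : Bool).toNat) ||| (2 * m + (false : Bool).toNat)
        = 2 * (2^n ||| m) + ((false : Bool) || false).toNat := by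
      have := Nat.lor_bit false (2^n) false m
      simpa [Nat.bit_val, Nat.mul_comm] using this
    calc 2^(n+1) ||| 2 * m
        = (2 * 2^n + (false : Bool).toNat) ||| (2 * m + (false : Bool).toNat) := by
          norm_num [Nat.pow_succ, Nat.mul_comm]
      _ = 2 * (2^n ||| m) + ((false : Bool) || false).toNat := h1
      _ = 2 * (2^n + m) := by simp [ih _ hm]
      _ = 2^(n+1) + 2 * m := by rw [Nat.pow_succ]; ring

-- OR-folding pairwise-increasing bit positions equals summing the powers (Nat level, left fold).
theorem pvNatOrFold : ∀ (l : List Nat) (m acc : Nat), l.Pairwise (· < ·) → (∀ x ∈ l, m ≤ x) → acc < 2^m →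
    l.foldl (fun v p => v ||| 2^p) acc = acc + (l.map (fun p => (2 : Nat)^p)).sum := by
  intro l
  induction l with
  | nil => intro m acc _ _ _; simp
  | cons p tl ih =>
    intro m acc hpw hge hacc
    have hmp : m ≤ p := hge p (by simp)
    have haccp : acc < 2^p := lt_of_lt_of_le hacc (Nat.pow_le_pow_right (by norm_num) hmp)
    have hstep : acc ||| 2^p = acc + 2^p := pvLorTwoPow p acc haccp
    have htl : ∀ x ∈ tl, p + 1 ≤ x := by
      intro x hx; exact Nat.succ_le_of_lt ((List.pairwise_cons.mp hpw).1 x hx)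
    have hacc' : acc + 2^p < 2^(p+1) := by
      have : acc < 2^p := haccp; rw [Nat.pow_succ]; omega
    simp only [List.foldl_cons, hstep, List.map_cons, List.sum_cons]
    rw [ih (p+1) (acc + 2^p) (List.pairwise_cons.mp hpw).2 htl hacc']
    ring

-- Right fold from the other end: same sum (Nat level).
theorem pvNatOrFoldr : ∀ (l : List Nat), l.Pairwise (· < ·) →
    l.foldr (fun p w => 2^p ||| w) 0 = (l.map (fun p => (2 : Nat)^p)).sum := by
  intro l
  induction l with
  | nil => intro _; simp
  | cons p tl ih =>
    intro hpw
    have htl := (List.pairwise_cons.mp hpw).2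
    have hdvd : (2 : Nat)^(p+1) ∣ (tl.map (fun q => (2 : Nat)^q)).sum := by
      apply List.dvd_sum
      intro x hx
      obtain ⟨q, hq, rfl⟩ := List.mem_map.mp hx
      exact pow_dvd_pow 2 (Nat.succ_le_of_lt ((List.pairwise_cons.mp hpw).1 q hq))
    simp only [List.foldr_cons, ih htl, List.map_cons, List.sum_cons]
    exact pvLorTwoPowHigh p _ hdvd

theorem pvShiftOne (k : Nat) : (1 : Int) <<< ((k : Nat) : Int) = ((2^k : Nat) : Int) := by
  have h := Int.shiftLeft_natCast 1 k
  simpa [Nat.one_shiftLeft] using h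

theorem pvSumCast : ∀ (bs : List Int),
    (bs.map (fun p => (1 : Int) <<< p.toNat)).sum
      = ((((bs.map Int.toNat).map (fun p => (2 : Nat)^p)).sum : Nat) : Int) := by
  intro bs
  induction bs with
  | nil => simp
  | cons b tl ih =>
    simp only [List.map_cons, List.sum_cons, List.map_map]
    rw [pvShiftOne b.toNat, ih]
    push_cast
    simp [List.map_map]

theorem pvPairwiseNat (bits : List Int) (h0 : ∀ p ∈ bits, 0 ≤ p) (hpw : bits.Pairwise (· < ·)) :
    (bits.map Int.toNat).Pairwise (· < ·) := by
  rw [List.pairwise_map]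
  refine List.Pairwise.imp_of_mem ?_ hpw
  intro a b ha _ hlt
  have := h0 a ha
  omega

-- Int-level: A's OR-accumulating left fold equals the sum of powers, for nonneg
-- pairwise-increasing positions.
theorem pvWordEq (bits : List Int) (h0 : ∀ p ∈ bits, 0 ≤ p) (hpw : bits.Pairwise (· < ·)) :
    bits.foldl (fun v pos => PySem.Int.bor v ((1 : Int) <<< pos.toNat)) 0
      = (bits.map (fun p => (1 : Int) <<< p.toNat)).sum := by
  have hfold : ∀ (bs : List Int) (acc : Nat), (∀ p ∈ bs, 0 ≤ p) →
      bs.foldl (fun v pos => PySem.Int.bor v ((1 : Int) <<< pos.toNat)) (acc : Int)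
        = (((bs.map Int.toNat).foldl (fun v p => v ||| 2^p) acc : Nat) : Int) := by
    intro bs
    induction bs with
    | nil => intro acc _; simp
    | cons b tl ih =>
      intro acc hnn
      simp only [List.foldl_cons, List.map_cons]
      rw [pvShiftOne, PySem.Int.bor_natCast, ih _ (fun p hp => hnn p (by simp [hp]))]
  have hor := pvNatOrFold (bits.map Int.toNat) 0 0 (pvPairwiseNat bits h0 hpw)
    (fun x _ => Nat.zero_le x) (by norm_num)
  rw [Nat.zero_add] at hor
  have h00 := hfold bits 0 h0
  rw [Nat.cast_zero] at h00
  rw [h00, hor, pvSumCast]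

-- Int-level: B's word, built by prepending lower bits with OR, equals the same sum.
theorem pvWordEqB (bits : List Int) (h0 : ∀ p ∈ bits, 0 ≤ p) (hpw : bits.Pairwise (· < ·)) :
    bits.foldr (fun p w => PySem.Int.bor ((1 : Int) <<< (p.toNat : Int)) w) 0
      = (bits.map (fun p => (1 : Int) <<< p.toNat)).sum := by
  have hfold : ∀ (bs : List Int), (∀ p ∈ bs, 0 ≤ p) →
      bs.foldr (fun p w => PySem.Int.bor ((1 : Int) <<< (p.toNat : Int)) w) 0
        = (((bs.map Int.toNat).foldr (fun p w => 2^p ||| w) 0 : Nat) : Int) := by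
    intro bs
    induction bs with
    | nil => intro _; simp
    | cons b tl ih =>
      intro hnn
      simp only [List.foldr_cons, List.map_cons]
      rw [ih (fun p hp => hnn p (by simp [hp])), pvShiftOne, PySem.Int.bor_natCast]
  rw [hfold bits h0, pvNatOrFoldr (bits.map Int.toNat) (pvPairwiseNat bits h0 hpw), pvSumCast]

-- B's filtering loop over the enumerated stream, as an append of the filtered projection.
theorem pvFoldFilter (t s : Int) :
    ∀ (l : List (Int × Int)) (acc : List Int),
      l.foldl (fun acc iv => if PySem.Int.mod iv.1 t == s then acc ++ [iv.2] else acc) acc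
        = acc ++ (l.filter (fun iv => PySem.Int.mod iv.1 t == s)).map (·.2) := by
  intro l
  induction l with
  | nil => intro acc; simp
  | cons iv tl ih =>
    intro acc
    simp only [List.foldl_cons, List.filter_cons]
    by_cases h : PySem.Int.mod iv.1 t == s
    · rw [if_pos h, if_pos h, ih, List.map_cons, List.append_assoc, List.singleton_append]
    · rw [if_neg h, if_neg h, ih]

-- Nested foldl over a list of lists is the foldl of the flatMap.
theorem pvFoldlFlatMap {α β σ : Type} (f : σ → β → σ) (g : α → List β) :
    ∀ (l : List α) (init : σ),
      l.foldl (fun st k => (g k).foldl f st) init = (l.flatMap g).foldl f init := by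
  intro l
  induction l with
  | nil => intro init; simp
  | cons a tl ih => intro init; simp [List.foldl_append, ih]

-- A's counter-carrying loop over a block of words = append of the enumerate-filtered words.
theorem pvSliceFold (w : List Int → Int) (t s : Int) :
    ∀ (W : List (List Int)) (n : Int) (acc : List Int),
      W.foldl (fun st bits =>
          ((st.1 + 1 : Int),
            if PySem.Int.mod (st.1 + 1) t == s then st.2 ++ [w bits] else st.2)) (n, acc)
      = (n + W.length,
         acc ++ ((PySem.List.enumerate (W.map w) (n+1)).filter
                  (fun iv => PySem.Int.mod iv.1 t == s)).map (·.2)) := by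
  intro W
  induction W with
  | nil => intro n acc; simp
  | cons bits tl ih =>
    intro n acc
    simp only [List.foldl_cons, List.map_cons, PySem.List.enumerate_cons, List.filter_cons]
    rw [ih]
    by_cases h : PySem.Int.mod (n + 1) t == s <;>
      simp [h, List.append_assoc] <;> omega

-- The DP table after processing position list s (B folds over reversed positions = foldr over s).
def pvTable (kmax : Nat) (s : List Int) : List (List Int) :=
  (List.range (kmax + 1)).map (fun k =>
    (PySem.List.combinations s k).map
      (fun bits => bits.foldr (fun p w => PySem.Int.bor ((1 : Int) <<< (p.toNat : Int)) w) 0))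

theorem pvTableGetD (kmax : Nat) (s : List Int) (k : Nat) (hk : k < kmax + 1) :
    (pvTable kmax s).getD k []
      = (PySem.List.combinations s k).map
          (fun bits => bits.foldr (fun p w => PySem.Int.bor ((1 : Int) <<< (p.toNat : Int)) w) 0) := by
  simp [pvTable, List.getD, hk]

theorem pvTableNil (kmax : Nat) : pvTable kmax [] = [[(0 : Int)]] ++ List.replicate kmax [] := by
  unfold pvTable
  rw [List.range_succ_eq_map, List.map_cons, List.map_map, PySem.List.combinations_zero,
      List.singleton_append]
  congr 1
  rw [List.eq_replicate_iff]
  refine ⟨by simp, ?_⟩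
  intro b hb
  obtain ⟨i, _, rfl⟩ := List.mem_map.mp hb
  simp only [Function.comp, Nat.succ_eq_add_one, PySem.List.combinations_nil_succ, List.map_nil]

theorem pvTableStep (kmax : Nat) (p : Int) (s : List Int) :
    [(pvTable kmax s).getD 0 []] ++ (List.range kmax).map (fun i =>
        (((pvTable kmax s).getD i []).map
          (fun w => PySem.Int.bor ((1 : Int) <<< (p.toNat : Int)) w)) ++ (pvTable kmax s).getD (i + 1) [])
      = pvTable kmax (p :: s) := by
  have hL : [(pvTable kmax s).getD 0 []] ++ (List.range kmax).map (fun i =>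
        (((pvTable kmax s).getD i []).map
          (fun w => PySem.Int.bor ((1 : Int) <<< (p.toNat : Int)) w)) ++ (pvTable kmax s).getD (i + 1) [])
      = [(PySem.List.combinations s 0).map
          (fun bits => bits.foldr (fun q w => PySem.Int.bor ((1 : Int) <<< (q.toNat : Int)) w) 0)]
        ++ (List.range kmax).map (fun i =>
          (((PySem.List.combinations s i).map
              (fun bits => bits.foldr (fun q w => PySem.Int.bor ((1 : Int) <<< (q.toNat : Int)) w) 0)).map
            (fun w => PySem.Int.bor ((1 : Int) <<< (p.toNat : Int)) w))
          ++ (PySem.List.combinations s (i + 1)).map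
              (fun bits => bits.foldr (fun q w => PySem.Int.bor ((1 : Int) <<< (q.toNat : Int)) w) 0)) := by
    congr 1
    · rw [pvTableGetD kmax s 0 (by omega)]
    · apply List.map_congr_left
      intro i hi
      have hi' : i < kmax := List.mem_range.mp hi
      rw [pvTableGetD kmax s i (by omega), pvTableGetD kmax s (i + 1) (by omega)]
  rw [hL]
  conv_rhs => unfold pvTable
  rw [List.range_succ_eq_map, List.map_cons, List.map_map, PySem.List.combinations_zero,
      List.singleton_append]
  congr 1
  apply List.map_congr_left
  intro i _
  simp only [Function.comp, Nat.succ_eq_add_one]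
  rw [PySem.List.combinations_cons_succ, List.map_append, List.map_map, List.map_map]
  rfl

-- B's fold over the reversed positions builds exactly the DP table of all positions.
theorem pvRowsEq (kmax : Nat) : ∀ (s : List Int),
    s.reverse.foldl (fun rows p =>
        [rows.getD 0 []] ++ (List.range kmax).map (fun i =>
          ((rows.getD i []).map (fun w => PySem.Int.bor ((1 : Int) <<< (p.toNat : Int)) w)) ++ rows.getD (i + 1) []))
      ([[(0 : Int)]] ++ List.replicate kmax [])
      = pvTable kmax s := by
  intro s
  rw [List.foldl_reverse, ← pvTableNil kmax]
  induction s with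
  | nil => simp
  | cons p tl ih =>
    simp only [List.foldr_cons, ih]
    exact pvTableStep kmax p tl

-- ===== VERDICT (by name: the statement is the Claim_ definition above) =====
theorem sliced_enumerate_words_with_k_bits_set_spec : Claim_equal_sliced_enumerate_words_with_k_bits_set := by
  intro nb mx si ts mk _ _
  unfold Spec_sliced_enumerate_words_with_k_bits_set
  unfold sliced_enumerate_words_with_k_bits_set sliced_enumerate_words_with_k_bits_set_alt
  dsimp only
  set pos : List Int :=
    (PySem.List.pyRange 0 nb 1).filter (fun p => PySem.Int.band mk ((1 : Int) <<< p.toNat) == 0) with hposdef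
  have hnn : ∀ p ∈ pos, 0 ≤ p := by
    intro p hp
    have := (List.mem_filter.mp hp).1
    exact ((PySem.List.mem_pyRange_one).mp this).1
  have hpw : pos.Pairwise (· < ·) :=
    (PySem.List.pairwise_lt_pyRange_one 0 nb).filter _
  set kmax : Nat := (max mx 0).toNat with hkmax
  -- B side: rows = DP table; flatten it.
  rw [pvRowsEq kmax pos]
  have hflat : (pvTable kmax pos).flatMap id
      = [(0 : Int)] ++ (List.range kmax).flatMap (fun i =>
          (PySem.List.combinations pos (i + 1)).map
            (fun bits => (bits.map (fun p => (1 : Int) <<< p.toNat)).sum)) := by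
    unfold pvTable
    rw [List.range_succ_eq_map, List.map_cons, List.flatMap_cons, List.map_map]
    congr 1
    · simp [PySem.List.combinations_zero]
    · rw [List.flatMap_map]
      apply List.flatMap_congr
      intro i _
      simp only [Function.comp, id]
      apply List.map_congr_left
      intro bits hb
      have hsub : bits.Sublist pos := PySem.List.sublist_of_mem_combinations hb
      exact pvWordEqB bits (fun p hp => hnn p (hsub.subset hp)) (hpw.sublist hsub)
  -- A side: nested folds = enumerate-filter of the same stream.
  rw [pvFoldlFlatMap, pvSliceFold
    (fun bits => bits.foldl (fun v p => PySem.Int.bor v ((1 : Int) <<< p.toNat)) 0) ts si]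
  rw [pvFoldFilter ts si]
  dsimp only
  rw [List.map_flatMap]
  have hA : (PySem.List.pyRange 1 (mx + 1) 1).flatMap (fun k =>
        (PySem.List.combinations pos k.toNat).map
          (fun bits => bits.foldl (fun v p => PySem.Int.bor v ((1 : Int) <<< p.toNat)) 0))
      = (List.range kmax).flatMap (fun i =>
          (PySem.List.combinations pos (i + 1)).map
            (fun bits => (bits.map (fun p => (1 : Int) <<< p.toNat)).sum)) := by
    rw [PySem.List.pyRange_one, List.flatMap_map]
    have hlen : (mx + 1 - 1).toNat = kmax := by rw [hkmax]; omega
    rw [hlen]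
    apply List.flatMap_congr
    intro i _
    have htn : ((1 : Int) + (i : Int)).toNat = i + 1 := by omega
    rw [htn]
    apply List.map_congr_left
    intro bits hb
    have hsub : bits.Sublist pos := PySem.List.sublist_of_mem_combinations hb
    exact pvWordEq bits (fun p hp => hnn p (hsub.subset hp)) (hpw.sublist hsub)
  rw [hA, hflat]
  simp only [List.singleton_append, PySem.List.enumerate_cons, List.filter_cons]
  by_cases hc : PySem.Int.mod 0 ts == si <;> simp [hc]
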